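-- pv_equiv track=rewrite | github.com/equinor/ert | src/ert/validation/rangestring.py | rangestring_to_mask
-- ===== SOURCE A (Python) =====
-- from typing import Collection, List, Optional, Union
--
-- def rangestring_to_mask(rangestring: str, length: int) -> List[bool]:
--     """Convert a string specifying ranges of elements, and the number of elements,
--     into a list of booleans. The ranges are end-inclusive.
--
--     >>> rangestring_to_mask("1, 3-5", 6)
--     [False, True, False, True, True, True]
--     >>> rangestring_to_mask("", 0)
--     []
--     >>> rangestring_to_mask("", 1)
--     [False]
--     >>> rangestring_to_mask("1", 2)
--     [False, True]
--     """
--     mask = [False] * length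
--     if not rangestring:
--         # An empty string means no active indecies. Note that an
--         # IndexRange-typed instance being None means the opposite
--         return mask
--     for _range in rangestring.split(","):
--         if "-" in _range:
--             if len(_range.strip().split("-")) != 2:
--                 raise ValueError(f"Wrong range syntax {_range}")
--             start, end = map(int, _range.strip().split("-"))
--             if end < start:
--                 raise ValueError(f"Range {start}-{end} has invalid direction")
--             if end + 1 > length:
--                 raise ValueError(
--                     f"Range endpoint {end} is beyond the mask length {length} "
--                 )
--             mask[start : end + 1] = [True] * (end + 1 - start)
--         elif _range:
--             if int(_range) + 1 > length:
--                 raise ValueError(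
--                     f"Realization index {_range} is beyond the mask length {length} "
--                 )
--             mask[int(_range)] = True
--     return mask
-- ===== SOURCE B (Python) =====
-- def rangestring_to_mask(rangestring: str, length: int):
--     # stage 1: parse the string into a list of end-inclusive intervals
--     intervals = []
--     for piece in rangestring.split(","):
--         if "-" in piece:
--             parts = piece.strip().split("-")
--             if len(parts) != 2:
--                 raise ValueError(f"Wrong range syntax {piece}")
--             start, end = map(int, parts)
--             if end < start:
--                 raise ValueError(f"Range {start}-{end} has invalid direction")
--             if end + 1 > length:
--                 raise ValueError(
--                     f"Range endpoint {end} is beyond the mask length {length} "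
--                 )
--             intervals.append((start, end))
--         elif piece:
--             idx = int(piece)
--             if idx + 1 > length:
--                 raise ValueError(
--                     f"Realization index {piece} is beyond the mask length {length} "
--                 )
--             intervals.append((idx, idx))
--     # stage 2: difference array over the positions
--     n = max(length, 0)
--     diff = [0] * (n + 1)
--     for start, end in intervals:
--         diff[start] += 1
--         diff[end + 1] -= 1
--     # stage 3: prefix-sum sweep; position is active iff covered by >= 1 interval
--     mask = []
--     acc = 0
--     for d in diff[:n]:
--         acc += d
--         mask.append(acc > 0)
--     return mask
-- ===== Notes on version B (the rewrite author's own statement) =====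
-- stated objective: alternative
-- what changed: B is staged: it first parses the string into a list of end-inclusive (start,end) intervals (a single index becomes (i,i)), then builds a difference array (+1 at start, -1 at end+1) and emits the mask by a prefix-sum sweep (active iff the running coverage count is positive), instead of A's single loop that mutates a preallocated boolean mask via slice and index assignment.
import Mathlib
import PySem

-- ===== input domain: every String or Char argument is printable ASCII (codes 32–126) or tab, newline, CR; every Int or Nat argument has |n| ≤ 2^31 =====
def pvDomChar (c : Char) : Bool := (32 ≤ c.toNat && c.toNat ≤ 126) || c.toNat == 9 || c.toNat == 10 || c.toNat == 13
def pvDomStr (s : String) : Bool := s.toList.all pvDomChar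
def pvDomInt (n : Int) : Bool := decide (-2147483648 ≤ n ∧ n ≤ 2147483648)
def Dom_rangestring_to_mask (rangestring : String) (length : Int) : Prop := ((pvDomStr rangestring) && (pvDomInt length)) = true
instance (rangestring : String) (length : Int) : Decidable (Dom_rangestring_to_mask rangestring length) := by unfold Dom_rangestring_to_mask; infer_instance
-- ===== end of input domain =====

-- B replaces A's mask-mutating loop by three stages: parse into (start,end) intervals, build a
-- difference array, then emit the mask by a prefix-sum sweep (active iff coverage count > 0).

-- ===== PORT A =====
-- Python slice assignment xs[a:b] = ys; exact for 0 ≤ a ≤ b (the only case A's code reaches).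
def pvSetSlice (xs : List Bool) (a b : Int) (ys : List Bool) : List Bool :=
  xs.take (min a.toNat xs.length) ++ ys ++ xs.drop (min b.toNat xs.length)

-- one iteration of A's loop; the Option state is none exactly where the Python has raised ValueError
def pvStepA (length : Int) (acc : Option (List Bool)) (r : List Char) : Option (List Bool) :=
  match acc with
  | none => none
  | some mask =>
    if '-' ∈ r then
      match PySem.Chars.splitOn (PySem.Chars.strip r) ['-'] with
      | [p, q] =>
        match PySem.Int.ofChars? p, PySem.Int.ofChars? q with
        | some start, some stop =>
          if stop < start then none
          else if stop + 1 > length then none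
          else some (pvSetSlice mask start (stop + 1) (PySem.List.pyRepeat [true] (stop + 1 - start)))
        | _, _ => none
      | _ => none
    else if r ≠ [] then
      match PySem.Int.ofChars? r with
      | some n => if n + 1 > length then none else PySem.List.pySet? mask n true
      | none => none
    else some mask

def rangestring_to_mask (rangestring : String) (length : Int) : List Bool :=
  let mask : List Bool := List.replicate length.toNat false
  if rangestring.toList = [] then mask
  else (((PySem.Chars.splitOn rangestring.toList [',']).foldl (pvStepA length) (some mask)).getD [])

-- ===== PORT B =====
-- stage 1 of B: one iteration of the parse loop (same validation order as the Python);
-- the Option state is none exactly where the Python has raised ValueError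
def pvParseStep (length : Int) (acc : Option (List (Int × Int))) (r : List Char) : Option (List (Int × Int)) :=
  match acc with
  | none => none
  | some ivs =>
    if '-' ∈ r then
      match PySem.Chars.splitOn (PySem.Chars.strip r) ['-'] with
      | [p, q] =>
        match PySem.Int.ofChars? p, PySem.Int.ofChars? q with
        | some start, some stop =>
          if stop < start then none
          else if stop + 1 > length then none
          else some (ivs ++ [(start, stop)])
        | _, _ => none
      | _ => none
    else if r ≠ [] then
      match PySem.Int.ofChars? r with
      | some idx => if idx + 1 > length then none else some (ivs ++ [(idx, idx)])
      | none => none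
    else some ivs

-- stage 2 of B: diff[start] += 1; diff[end+1] -= 1 (indices are in range on every input the
-- Python reaches this line on, since the parse loop has already validated 0 ≤ start ≤ end < length)
def pvApplyDiff (d : List Int) (p : Int × Int) : List Int :=
  let d1 := d.set p.1.toNat (d.getD p.1.toNat 0 + 1)
  d1.set (p.2 + 1).toNat (d1.getD ((p.2 + 1).toNat) 0 - 1)

def rangestring_to_mask_alt (rangestring : String) (length : Int) : List Bool :=
  match (PySem.Chars.splitOn rangestring.toList [',']).foldl (pvParseStep length) (some []) with
  | none => []
  | some ivs =>
    let n := (max length 0).toNat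
    let diff := ivs.foldl pvApplyDiff (List.replicate (n + 1) 0)
    -- stage 3: prefix-sum sweep over diff[:n]
    ((diff.take n).foldl (fun st d => (st.1 + d, st.2 ++ [decide (0 < st.1 + d)])) ((0 : Int), ([] : List Bool))).2

-- ===== PRECONDITION & SPEC =====
-- Pre_ holds exactly where the Python A returns (it raises ValueError on any other comma piece);
-- the 0 ≤ s / 0 ≤ n conjuncts are automatic for A's inputs (a '-'-free piece never parses negative).
def pvPieceOK (length : Int) (r : List Char) : Bool :=
  if '-' ∈ r then
    match PySem.Chars.splitOn (PySem.Chars.strip r) ['-'] with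
    | [p, q] =>
      match PySem.Int.ofChars? p, PySem.Int.ofChars? q with
      | some s, some e => decide (0 ≤ s ∧ s ≤ e ∧ e + 1 ≤ length)
      | _, _ => false
    | _ => false
  else if r = [] then true
  else
    match PySem.Int.ofChars? r with
    | some n => decide (0 ≤ n ∧ n + 1 ≤ length)
    | none => false

def Pre_rangestring_to_mask (rangestring : String) (length : Int) : Prop :=
  rangestring.toList = [] ∨ ((PySem.Chars.splitOn rangestring.toList [',']).all (pvPieceOK length)) = true

instance (rangestring : String) (length : Int) : Decidable (Pre_rangestring_to_mask rangestring length) := by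
  unfold Pre_rangestring_to_mask; infer_instance

def pvWitness_rangestring_to_mask : String × Int := ("1, 3-5", 6)

def Spec_rangestring_to_mask (rangestring : String) (length : Int) (out : List Bool) : Prop :=
  out = rangestring_to_mask_alt rangestring length

instance (rangestring : String) (length : Int) (out : List Bool) : Decidable (Spec_rangestring_to_mask rangestring length out) := by
  unfold Spec_rangestring_to_mask; infer_instance

-- ===== CLAIM (what is proved, stated in full; the proofs are below) =====
def Claim_equal_rangestring_to_mask : Prop := ∀ (rangestring : String) (length : Int), Dom_rangestring_to_mask rangestring length → Pre_rangestring_to_mask rangestring length → Spec_rangestring_to_mask rangestring length (rangestring_to_mask rangestring length)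

-- ===== LEMMAS AND PROOFS =====

-- i is covered by one of the intervals
def pvCovered (ivs : List (Int × Int)) (i : Int) : Bool :=
  ivs.any (fun p => decide (p.1 ≤ i ∧ i ≤ p.2))

-- the mask the interval list denotes
def pvMaskOf (len : Int) (ivs : List (Int × Int)) : List Bool :=
  (PySem.List.pyRange 0 len 1).map (pvCovered ivs)

lemma pvMaskOf_length (len : Int) (ivs : List (Int × Int)) : (pvMaskOf len ivs).length = len.toNat := by
  simp [pvMaskOf, PySem.List.length_pyRange_one]

lemma pvMaskOf_nil (len : Int) : pvMaskOf len [] = List.replicate len.toNat false := by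
  unfold pvMaskOf
  rw [List.eq_replicate_iff]
  refine ⟨by simp [PySem.List.length_pyRange_one], ?_⟩
  intro b hb
  rcases List.mem_map.mp hb with ⟨i, _, rfl⟩
  simp [pvCovered]

lemma pvCovered_append (ivs : List (Int × Int)) (s e i : Int) :
    pvCovered (ivs ++ [(s, e)]) i = (pvCovered ivs i || decide (s ≤ i ∧ i ≤ e)) := by
  simp [pvCovered]

lemma pvMaskOf_slice (len s e : Int) (ivs : List (Int × Int))
    (h0 : 0 ≤ s) (hse : s ≤ e + 1) (hel : e + 1 ≤ len) :
    (pvMaskOf len ivs).take s.toNat ++ List.replicate (e + 1 - s).toNat true ++ (pvMaskOf len ivs).drop (e + 1).toNat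
      = pvMaskOf len (ivs ++ [(s, e)]) := by
  have h3 : PySem.List.pyRange 0 len 1
      = PySem.List.pyRange 0 s 1 ++ (PySem.List.pyRange s (e + 1) 1 ++ PySem.List.pyRange (e + 1) len 1) := by
    rw [← PySem.List.pyRange_one_append s (e + 1) len hse hel]
    exact PySem.List.pyRange_one_append 0 s len h0 (hse.trans hel)
  unfold pvMaskOf
  rw [h3]
  simp only [List.map_append]
  have lA : (List.map (pvCovered ivs) (PySem.List.pyRange 0 s 1)).length = s.toNat := by
    simp [PySem.List.length_pyRange_one]
  have lAB : (List.map (pvCovered ivs) (PySem.List.pyRange 0 s 1)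
      ++ List.map (pvCovered ivs) (PySem.List.pyRange s (e + 1) 1)).length = (e + 1).toNat := by
    simp only [List.length_append, List.length_map, PySem.List.length_pyRange_one]
    omega
  rw [List.take_left' lA, ← List.append_assoc, List.drop_left' lAB]
  have hA : List.map (pvCovered ivs) (PySem.List.pyRange 0 s 1)
      = List.map (pvCovered (ivs ++ [(s, e)])) (PySem.List.pyRange 0 s 1) := by
    apply List.map_congr_left
    intro i hi
    rw [PySem.List.mem_pyRange_one] at hi
    rw [pvCovered_append]
    have : decide (s ≤ i ∧ i ≤ e) = false := by
      rw [decide_eq_false_iff_not]; omega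
    rw [this, Bool.or_false]
  have hC : List.map (pvCovered ivs) (PySem.List.pyRange (e + 1) len 1)
      = List.map (pvCovered (ivs ++ [(s, e)])) (PySem.List.pyRange (e + 1) len 1) := by
    apply List.map_congr_left
    intro i hi
    rw [PySem.List.mem_pyRange_one] at hi
    rw [pvCovered_append]
    have : decide (s ≤ i ∧ i ≤ e) = false := by
      rw [decide_eq_false_iff_not]; omega
    rw [this, Bool.or_false]
  have hB : List.replicate (e + 1 - s).toNat true
      = List.map (pvCovered (ivs ++ [(s, e)])) (PySem.List.pyRange s (e + 1) 1) := by
    symm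
    rw [List.eq_replicate_iff]
    refine ⟨by simp [PySem.List.length_pyRange_one], ?_⟩
    intro b hb
    rcases List.mem_map.mp hb with ⟨i, hi, rfl⟩
    rw [PySem.List.mem_pyRange_one] at hi
    rw [pvCovered_append]
    have : decide (s ≤ i ∧ i ≤ e) = true := by
      rw [decide_eq_true_iff]; omega
    rw [this, Bool.or_true]
  rw [hA, hB, hC, List.append_assoc]

lemma pvMaskOf_set (len n : Int) (ivs : List (Int × Int)) (h0 : 0 ≤ n) (hl : n + 1 ≤ len) :
    (pvMaskOf len ivs).set n.toNat true = pvMaskOf len (ivs ++ [(n, n)]) := by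
  have hlt : n.toNat < (pvMaskOf len ivs).length := by rw [pvMaskOf_length]; omega
  rw [List.set_eq_take_append_cons_drop, if_pos hlt]
  have h1 : (true :: (pvMaskOf len ivs).drop (n.toNat + 1))
      = List.replicate (n + 1 - n).toNat true ++ (pvMaskOf len ivs).drop (n + 1).toNat := by
    have : (n + 1 - n).toNat = 1 := by omega
    rw [this]
    have : (n + 1).toNat = n.toNat + 1 := by omega
    rw [this]
    rfl
  rw [h1, ← List.append_assoc]
  exact pvMaskOf_slice len n n ivs h0 (by omega) hl

-- one OK piece: B's parse step appends δ and A's step moves the denoted mask accordingly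
lemma pvStep_ok (length : Int) (r : List Char) (ivs : List (Int × Int))
    (h : pvPieceOK length r = true) :
    ∃ δ, pvParseStep length (some ivs) r = some (ivs ++ δ) ∧
      pvStepA length (some (pvMaskOf length ivs)) r = some (pvMaskOf length (ivs ++ δ)) ∧
      ∀ p ∈ δ, 0 ≤ p.1 ∧ p.1 ≤ p.2 ∧ p.2 + 1 ≤ length := by
  unfold pvPieceOK at h
  simp only [pvStepA, pvParseStep]
  by_cases hdash : '-' ∈ r
  · rw [if_pos hdash] at h
    simp only [if_pos hdash]
    rcases hsplit : PySem.Chars.splitOn (PySem.Chars.strip r) ['-'] with _ | ⟨p, _ | ⟨q, _ | ⟨x, t⟩⟩⟩ <;>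
      rw [hsplit] at h <;> simp only at h
    · exact absurd h (by simp)
    · exact absurd h (by simp)
    · rcases hp : PySem.Int.ofChars? p with _ | start <;> rcases hq : PySem.Int.ofChars? q with _ | stop <;>
        rw [hp, hq] at h <;> simp only at h
      · exact absurd h (by simp)
      · exact absurd h (by simp)
      · exact absurd h (by simp)
      · rw [decide_eq_true_iff] at h
        obtain ⟨h0, hse, hel⟩ := h
        simp only [hp, hq]
        rw [if_neg (by omega), if_neg (by omega), if_neg (by omega), if_neg (by omega)]
        refine ⟨[(start, stop)], rfl, ?_, by simp; omega⟩
        have hmin1 : min start.toNat (pvMaskOf length ivs).length = start.toNat := by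
          rw [pvMaskOf_length]; omega
        have hmin2 : min (stop + 1).toNat (pvMaskOf length ivs).length = (stop + 1).toNat := by
          rw [pvMaskOf_length]; omega
        unfold pvSetSlice
        rw [hmin1, hmin2, PySem.List.pyRepeat_singleton]
        rw [pvMaskOf_slice length start stop ivs h0 (by omega) hel]
    · exact absurd h (by simp)
  · rw [if_neg hdash] at h
    simp only [if_neg hdash]
    by_cases hr : r = []
    · subst hr
      simp only [ne_eq, not_true_eq_false, if_false]
      exact ⟨[], by simp, by simp, by simp⟩
    · rw [if_neg hr] at h
      simp only [ne_eq, hr, not_false_eq_true, if_true]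
      rcases hn : PySem.Int.ofChars? r with _ | n <;> rw [hn] at h <;> simp only at h
      · exact absurd h (by simp)
      · rw [decide_eq_true_iff] at h
        obtain ⟨h0, hl⟩ := h
        dsimp only
        rw [if_neg (by omega), if_neg (by omega)]
        refine ⟨[(n, n)], rfl, ?_, by simp; omega⟩
        have hcast : n = ((n.toNat : Nat) : Int) := (Int.toNat_of_nonneg h0).symm
        have hset : PySem.List.pySet? (pvMaskOf length ivs) n true
            = some ((pvMaskOf length ivs).set n.toNat true) := by
          conv_lhs => rw [hcast]
          exact PySem.List.pySet?_natCast _ _ _ (by rw [pvMaskOf_length]; omega)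
        rw [hset, pvMaskOf_set length n ivs h0 hl]

-- the whole parse: B's fold produces some interval list; A's fold produces the denoted mask
lemma pvFold_ok (length : Int) (L : List (List Char)) :
    ∀ ivs : List (Int × Int), (∀ r ∈ L, pvPieceOK length r = true) →
    (∀ p ∈ ivs, 0 ≤ p.1 ∧ p.1 ≤ p.2 ∧ p.2 + 1 ≤ length) →
    ∃ ivs', L.foldl (pvParseStep length) (some ivs) = some ivs' ∧
      L.foldl (pvStepA length) (some (pvMaskOf length ivs)) = some (pvMaskOf length ivs') ∧
      ∀ p ∈ ivs', 0 ≤ p.1 ∧ p.1 ≤ p.2 ∧ p.2 + 1 ≤ length := by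
  induction L with
  | nil => intro ivs _ hb; exact ⟨ivs, rfl, rfl, hb⟩
  | cons r L ih =>
    intro ivs hall hb
    obtain ⟨δ, hB1, hA1, hδ⟩ := pvStep_ok length r ivs (hall r (by simp))
    have hb' : ∀ p ∈ ivs ++ δ, 0 ≤ p.1 ∧ p.1 ≤ p.2 ∧ p.2 + 1 ≤ length := by
      intro p hp
      rcases List.mem_append.mp hp with hp | hp
      · exact hb p hp
      · exact hδ p hp
    obtain ⟨ivs', hB, hA, hb''⟩ := ih (ivs ++ δ) (fun x hx => hall x (by simp [hx])) hb'
    exact ⟨ivs', by simpa [hB1] using hB, by simpa [hA1] using hA, hb''⟩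

-- B stage 3: the prefix-sum sweep, characterised pointwise by prefix sums of the diff list
lemma pvScan_eq (d : List Int) : ∀ (a : Int) (m : List Bool),
    (d.foldl (fun st x => (st.1 + x, st.2 ++ [decide (0 < st.1 + x)])) (a, m)).2
      = m ++ (List.range d.length).map (fun i => decide (0 < a + (d.take (i + 1)).sum)) := by
  induction d with
  | nil => intro a m; simp
  | cons x d ih =>
    intro a m
    simp only [List.foldl_cons]
    rw [ih (a + x) (m ++ [decide (0 < a + x)]), List.length_cons, List.range_succ_eq_map,
      List.append_assoc]
    congr 1
    simp only [List.map_cons, List.map_map, List.take_succ_cons, List.sum_cons, List.take_zero,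
      List.sum_nil, add_zero, List.singleton_append, add_assoc]
    refine congrArg (List.cons _) ?_
    apply List.map_congr_left
    intro i _
    rfl

lemma pvTakeSum_set (d : List Int) : ∀ (j k : Nat) (c : Int), j < d.length →
    ((d.set j (d.getD j 0 + c)).take k).sum = (d.take k).sum + (if j < k then c else 0) := by
  induction d with
  | nil => intro j k c h; simp at h
  | cons x t ih =>
    intro j k c h
    cases j with
    | zero =>
      cases k with
      | zero => simp
      | succ k =>
        simp only [List.set_cons_zero, List.take_succ_cons, List.sum_cons, List.getD_cons_zero]
        rw [if_pos (Nat.succ_pos k)]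
        ring
    | succ j =>
      cases k with
      | zero => simp
      | succ k =>
        simp only [List.set_cons_succ, List.take_succ_cons, List.sum_cons, List.getD_cons_succ]
        rw [ih j k c (by simpa using h)]
        by_cases hjk : j < k
        · rw [if_pos hjk, if_pos (by omega)]
          ring
        · rw [if_neg hjk, if_neg (by omega)]
          ring

lemma pvApplyDiff_length (d : List Int) (p : Int × Int) : (pvApplyDiff d p).length = d.length := by
  simp [pvApplyDiff]

lemma pvApplyDiff_takeSum (d : List Int) (p : Int × Int) (k : Nat)
    (h0 : 0 ≤ p.1) (hse : p.1 ≤ p.2) (hlen : (p.2 + 1).toNat < d.length) :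
    ((pvApplyDiff d p).take k).sum
      = (d.take k).sum + (if p.1.toNat < k then 1 else 0) + (if (p.2 + 1).toNat < k then -1 else 0) := by
  unfold pvApplyDiff
  have h1 : p.1.toNat < d.length := by omega
  have hsub : ∀ (l : List Int) (j : Nat), l.set j (l.getD j 0 - 1) = l.set j (l.getD j 0 + (-1)) := by
    intro l j; rw [sub_eq_add_neg]
  rw [hsub]
  rw [pvTakeSum_set _ ((p.2 + 1).toNat) k (-1) (by simpa using hlen)]
  rw [pvTakeSum_set d p.1.toNat k 1 h1]

lemma pvFoldDiff_takeSum (ivs : List (Int × Int)) : ∀ (d : List Int) (k : Nat),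
    (∀ p ∈ ivs, 0 ≤ p.1 ∧ p.1 ≤ p.2 ∧ (p.2 + 1).toNat < d.length) →
    ((ivs.foldl pvApplyDiff d).take k).sum
      = (d.take k).sum + (ivs.map (fun p => (if p.1.toNat < k then (1 : Int) else 0)
          + (if (p.2 + 1).toNat < k then -1 else 0))).sum := by
  induction ivs with
  | nil => intro d k _; simp
  | cons p ivs ih =>
    intro d k hb
    obtain ⟨h0, hse, hlen⟩ := hb p (by simp)
    simp only [List.foldl_cons, List.map_cons, List.sum_cons]
    rw [ih (pvApplyDiff d p) k (by
      intro q hq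
      have := hb q (by simp [hq])
      rwa [pvApplyDiff_length])]
    rw [pvApplyDiff_takeSum d p k h0 hse hlen]
    ring

lemma pvFoldDiff_length (ivs : List (Int × Int)) : ∀ (d : List Int),
    (ivs.foldl pvApplyDiff d).length = d.length := by
  induction ivs with
  | nil => intro d; rfl
  | cons p ivs ih => intro d; rw [List.foldl_cons, ih, pvApplyDiff_length]

-- B's stages 2+3 compute exactly the mask the interval list denotes
lemma pvAlt_eq_maskOf (length : Int) (ivs : List (Int × Int))
    (hb : ∀ p ∈ ivs, 0 ≤ p.1 ∧ p.1 ≤ p.2 ∧ p.2 + 1 ≤ length) :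
    ((((ivs.foldl pvApplyDiff (List.replicate ((max length 0).toNat + 1) 0)).take (max length 0).toNat).foldl
        (fun st d => (st.1 + d, st.2 ++ [decide (0 < st.1 + d)])) ((0 : Int), ([] : List Bool))).2)
      = pvMaskOf length ivs := by
  set n := (max length 0).toNat with hn
  have hdl : (ivs.foldl pvApplyDiff (List.replicate (n + 1) 0)).length = n + 1 := by
    rw [pvFoldDiff_length]; simp
  set diff := ivs.foldl pvApplyDiff (List.replicate (n + 1) 0) with hdiff
  have htl : (diff.take n).length = n := by rw [List.length_take, hdl]; omega
  rw [pvScan_eq (diff.take n) 0 [], List.nil_append, htl]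
  have hb' : ∀ p ∈ ivs, 0 ≤ p.1 ∧ p.1 ≤ p.2 ∧ (p.2 + 1).toNat < (List.replicate (n + 1) (0 : Int)).length := by
    intro p hp
    obtain ⟨h0, hse, hel⟩ := hb p hp
    refine ⟨h0, hse, ?_⟩
    rw [List.length_replicate]
    omega
  unfold pvMaskOf
  rw [PySem.List.pyRange_one]
  have hlen0 : (length - 0).toNat = n := by omega
  rw [hlen0, List.map_map]
  apply List.map_congr_left
  intro i hi
  rw [List.mem_range] at hi
  simp only [Function.comp_apply, zero_add]
  have htt : (diff.take n).take (i + 1) = diff.take (i + 1) := by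
    rw [List.take_take]
    congr 1
    omega
  rw [htt, hdiff, pvFoldDiff_takeSum ivs (List.replicate (n + 1) 0) (i + 1) hb']
  have hz : ((List.replicate (n + 1) (0 : Int)).take (i + 1)).sum = 0 := by
    rw [List.take_replicate]
    simp
  rw [hz, zero_add]
  have hmap : (ivs.map (fun p => (if p.1.toNat < i + 1 then (1 : Int) else 0)
      + (if (p.2 + 1).toNat < i + 1 then -1 else 0))).sum
      = (ivs.countP (fun p => decide (p.1 ≤ (i : Int) ∧ (i : Int) ≤ p.2)) : Int) := by
    rw [← PySem.List.sum_map_ite_one_zero]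
    congr 1
    apply List.map_congr_left
    intro p hp
    obtain ⟨h0, hse, hel⟩ := hb p hp
    simp only [decide_eq_true_eq]
    by_cases hc : p.1 ≤ (i : Int) ∧ (i : Int) ≤ p.2
    · rw [if_pos hc, if_pos (by omega), if_neg (by omega)]
      ring
    · rw [if_neg hc]
      by_cases hc1 : p.1 ≤ (i : Int)
      · rw [if_pos (by omega), if_pos (by omega)]; ring
      · rw [if_neg (by omega), if_neg (by omega)]; ring
  rw [hmap]
  rcases Bool.eq_false_or_eq_true (pvCovered ivs (i : Int)) with hcov | hcov
  · rw [hcov, decide_eq_true_iff]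
    unfold pvCovered at hcov
    rw [List.any_eq_true] at hcov
    obtain ⟨p, hp, hpd⟩ := hcov
    have : 0 < ivs.countP (fun p => decide (p.1 ≤ (i : Int) ∧ (i : Int) ≤ p.2)) := by
      rw [List.countP_pos_iff]
      exact ⟨p, hp, hpd⟩
    omega
  · rw [hcov, decide_eq_false_iff_not]
    intro hpos
    have : ∃ p ∈ ivs, decide (p.1 ≤ (i : Int) ∧ (i : Int) ≤ p.2) = true := by
      rw [← List.countP_pos_iff]
      omega
    obtain ⟨p, hp, hpd⟩ := this
    have : pvCovered ivs (i : Int) = true := by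
      unfold pvCovered
      rw [List.any_eq_true]
      exact ⟨p, hp, hpd⟩
    rw [this] at hcov
    exact absurd hcov (by simp)

-- ===== VERDICT (by name: the statement is the Claim_ definition above) =====
theorem rangestring_to_mask_spec : Claim_equal_rangestring_to_mask := by
  intro rs len _ hpre
  unfold Spec_rangestring_to_mask
  by_cases h : rs.toList = []
  · have hsplit : PySem.Chars.splitOn rs.toList [','] = [[]] := by rw [h]; decide
    have hfold : (PySem.Chars.splitOn rs.toList [',']).foldl (pvParseStep len) (some []) = some [] := by
      rw [hsplit]; simp [pvParseStep]
    have halt : rangestring_to_mask_alt rs len = List.replicate len.toNat false := by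
      unfold rangestring_to_mask_alt
      rw [hfold]
      exact (pvAlt_eq_maskOf len [] (by simp)).trans (by rw [pvMaskOf_nil])
    rw [halt]
    unfold rangestring_to_mask
    rw [if_pos h]
  · have hall : ((PySem.Chars.splitOn rs.toList [',']).all (pvPieceOK len)) = true := by
      rcases hpre with h' | h'
      · exact absurd h' h
      · exact h'
    rw [List.all_eq_true] at hall
    obtain ⟨ivs', hB, hA, hb⟩ := pvFold_ok len (PySem.Chars.splitOn rs.toList [',']) []
      (fun r hr => hall r hr) (by simp)
    have halt : rangestring_to_mask_alt rs len = pvMaskOf len ivs' := by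
      unfold rangestring_to_mask_alt
      rw [hB]
      exact pvAlt_eq_maskOf len ivs' hb
    rw [halt]
    unfold rangestring_to_mask
    rw [if_neg h]
    rw [pvMaskOf_nil] at hA
    rw [hA]
    rfl
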